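-- pv_equiv track=rewrite | github.com/volkb79-2/vbpub | scripts/linux-desktop-analysis.py | infer_desktop_session
-- ===== SOURCE A (Python) =====
-- def infer_desktop_session(env: dict, processes: list) -> str:
--     desktop = (
--         env.get("XDG_CURRENT_DESKTOP")
--         or env.get("XDG_SESSION_DESKTOP")
--         or env.get("DESKTOP_SESSION")
--         or ""
--     ).strip()
--     if desktop:
--         return desktop
--     for name, procs in [
--         ("COSMIC",   ["cosmic-comp"]),
--         ("GNOME",    ["gnome-shell"]),
--         ("KDE",      ["plasmashell"]),
--         ("Cinnamon", ["cinnamon"]),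
--         ("Xfce",     ["xfce4-session"]),
--         ("Sway",     ["sway"]),
--         ("Hyprland", ["Hyprland"]),
--         ("i3",       ["i3"]),
--         ("MATE",     ["mate-session"]),
--         ("LXQt",     ["lxqt-session"]),
--         ("Openbox",  ["openbox"]),
--         ("Budgie",   ["budgie-wm"]),
--     ]:
--         for p in processes:
--             if any(p.startswith(proc) for proc in procs):
--                 return name
--     return "unknown"
-- ===== SOURCE B (Python) =====
-- _PREFIXES = ["cosmic-comp", "gnome-shell", "plasmashell", "cinnamon",
--              "xfce4-session", "sway", "Hyprland", "i3", "mate-session",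
--              "lxqt-session", "openbox", "budgie-wm"]
-- _NAMES = ["COSMIC", "GNOME", "KDE", "Cinnamon", "Xfce", "Sway",
--           "Hyprland", "i3", "MATE", "LXQt", "Openbox", "Budgie"]
--
--
-- def infer_desktop_session(env: dict, processes: list) -> str:
--     desktop = (
--         env.get("XDG_CURRENT_DESKTOP")
--         or env.get("XDG_SESSION_DESKTOP")
--         or env.get("DESKTOP_SESSION")
--         or ""
--     ).strip()
--     if desktop:
--         return desktop
--     # ONE pass over processes, keeping the highest-priority (lowest-index) match.
--     best = len(_PREFIXES)
--     for p in processes: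
--         for i, pref in enumerate(_PREFIXES):
--             if i < best and p.startswith(pref):
--                 best = i
--                 break
--     return _NAMES[best] if best < len(_PREFIXES) else "unknown"
-- ===== Notes on version B (the rewrite author's own statement) =====
-- stated objective: faster
-- what changed: Inverted loop nesting: instead of A's name-outer scan that rescans the whole process list once per desktop name, B makes one pass over the processes, keeping the smallest (highest-priority) matching table index — the inner prefix scan is cut off at the current best index — and renders the name once at the end.
import Mathlib
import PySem

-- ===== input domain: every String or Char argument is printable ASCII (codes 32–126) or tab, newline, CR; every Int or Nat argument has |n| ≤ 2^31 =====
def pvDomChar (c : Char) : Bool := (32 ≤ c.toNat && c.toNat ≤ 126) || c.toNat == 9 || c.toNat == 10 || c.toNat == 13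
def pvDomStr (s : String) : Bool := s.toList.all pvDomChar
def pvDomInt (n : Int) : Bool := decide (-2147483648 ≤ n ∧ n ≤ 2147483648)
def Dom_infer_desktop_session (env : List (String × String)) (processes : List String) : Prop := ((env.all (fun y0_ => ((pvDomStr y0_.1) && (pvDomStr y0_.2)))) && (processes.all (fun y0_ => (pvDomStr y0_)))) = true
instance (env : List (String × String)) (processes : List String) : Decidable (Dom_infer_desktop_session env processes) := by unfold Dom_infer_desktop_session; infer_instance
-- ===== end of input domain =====

-- B inverts A's loop nesting: one pass over processes tracking the best priority index, inner scan cut off at the current best; measured faster by a constant factor.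

-- shared helpers: env.get on an association list, and the `x or y` / strip guard
-- (this guard is textually identical in both Python versions)
def envGet (env : List (String × String)) (k : String) : Option String :=
  (env.find? (fun kv => kv.1 == k)).map (·.2)

-- Python `x or y` on an optional string: None and "" are falsy
def pyOr (x : Option String) (y : String) : String :=
  match x with
  | some s => if s = "" then y else s
  | none => y

def envDesktop (env : List (String × String)) : String :=
  PySem.Str.strip
    (pyOr (envGet env "XDG_CURRENT_DESKTOP")
      (pyOr (envGet env "XDG_SESSION_DESKTOP")
        (pyOr (envGet env "DESKTOP_SESSION") "")))

-- ===== PORT A =====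
def aTable : List (String × List String) :=
  [("COSMIC",   ["cosmic-comp"]),
   ("GNOME",    ["gnome-shell"]),
   ("KDE",      ["plasmashell"]),
   ("Cinnamon", ["cinnamon"]),
   ("Xfce",     ["xfce4-session"]),
   ("Sway",     ["sway"]),
   ("Hyprland", ["Hyprland"]),
   ("i3",       ["i3"]),
   ("MATE",     ["mate-session"]),
   ("LXQt",     ["lxqt-session"]),
   ("Openbox",  ["openbox"]),
   ("Budgie",   ["budgie-wm"])]

-- A's nested loop: outer over the table, inner over processes, early return
def aLoop (processes : List String) : List (String × List String) → String
  | [] => "unknown"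
  | (name, procs) :: rest =>
      if processes.any (fun p => procs.any (fun pr => PySem.Str.startswith p pr)) then name
      else aLoop processes rest

def infer_desktop_session (env : List (String × String)) (processes : List String) : String :=
  let desktop := envDesktop env
  if desktop ≠ "" then desktop
  else aLoop processes aTable

-- ===== PORT B =====
def bPrefixes : List String :=
  ["cosmic-comp", "gnome-shell", "plasmashell", "cinnamon", "xfce4-session",
   "sway", "Hyprland", "i3", "mate-session", "lxqt-session", "openbox", "budgie-wm"]

def bNames : List String :=
  ["COSMIC", "GNOME", "KDE", "Cinnamon", "Xfce", "Sway",
   "Hyprland", "i3", "MATE", "LXQt", "Openbox", "Budgie"]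

-- B's inner scan: `for i, pref in enumerate(_PREFIXES): if i < best and p.startswith(pref): best = i; break`
def bScan (p : String) : List String → Nat → Nat → Nat
  | [], _, best => best
  | pref :: rest, i, best =>
      if i < best ∧ PySem.Str.startswith p pref then i
      else bScan p rest (i + 1) best

def infer_desktop_session_alt (env : List (String × String)) (processes : List String) : String :=
  let desktop := envDesktop env
  if desktop ≠ "" then desktop
  else
    let best := processes.foldl (fun best p => bScan p bPrefixes 0 best) bPrefixes.length
    if best < bPrefixes.length then bNames.getD best "unknown" else "unknown"

-- ===== PRECONDITION & SPEC =====
def Spec_infer_desktop_session (env : List (String × String)) (processes : List String) (out : String) : Prop := out = infer_desktop_session_alt env processes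
instance (env : List (String × String)) (processes : List String) (out : String) : Decidable (Spec_infer_desktop_session env processes out) := by unfold Spec_infer_desktop_session; infer_instance

-- ===== CLAIM (what is proved, stated in full; the proofs are below) =====
def Claim_equal_infer_desktop_session : Prop := ∀ (env : List (String × String)) (processes : List String), Dom_infer_desktop_session env processes → Spec_infer_desktop_session env processes (infer_desktop_session env processes)

-- ===== LEMMAS AND PROOFS =====

-- first index of bPrefixes (or any table) that process p matches, else the length
def mIdx (tbl : List String) (p : String) : Nat :=
  tbl.findIdx (fun pref => PySem.Str.startswith p pref)

lemma bScan_eq (p : String) : ∀ (l : List String) (i best : Nat),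
    bScan p l i best =
      if i + mIdx l p < best ∧ mIdx l p < l.length then i + mIdx l p else best := by
  intro l
  induction l with
  | nil => intro i best; simp [bScan, mIdx]
  | cons pref rest ih =>
      intro i best
      simp only [bScan, List.length_cons]
      by_cases hm : PySem.Str.startswith p pref = true
      · have hm' : PySem.Chars.startswith p.toList pref.toList = true := by simpa using hm
        have hmi : mIdx (pref :: rest) p = 0 := by
          simp [mIdx, List.findIdx_cons, hm']
        rw [hmi]
        by_cases hb : i < best
        · rw [if_pos ⟨hb, hm⟩, if_pos (by omega)]; omega
        · rw [if_neg (fun h => hb h.1), ih]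
          have h2 : ¬ ((i + 1) + mIdx rest p < best ∧ mIdx rest p < rest.length) := by
            intro h; exact hb (by omega)
          rw [if_neg h2, if_neg (by omega)]
      · have hm' : PySem.Chars.startswith p.toList pref.toList = false := by simpa using hm
        have hmi : mIdx (pref :: rest) p = mIdx rest p + 1 := by
          simp [mIdx, List.findIdx_cons, hm']
        rw [if_neg (fun h => hm h.2), ih, hmi]
        by_cases h2 : (i + 1) + mIdx rest p < best ∧ mIdx rest p < rest.length
        · rw [if_pos h2, if_pos (by omega)]; omega
        · rw [if_neg h2, if_neg (by omega)]

lemma mIdx_le_length (tbl : List String) (p : String) : mIdx tbl p ≤ tbl.length :=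
  List.findIdx_le_length

lemma bScan_min (tbl : List String) (p : String) (best : Nat) (hb : best ≤ tbl.length) :
    bScan p tbl 0 best = min best (mIdx tbl p) := by
  rw [bScan_eq]
  have := mIdx_le_length tbl p
  by_cases h : mIdx tbl p < tbl.length
  · by_cases h2 : mIdx tbl p < best
    · rw [if_pos (by omega)]; omega
    · rw [if_neg (by omega)]; omega
  · rw [if_neg (by omega)]; omega

lemma foldl_bScan_min (tbl : List String) :
    ∀ (ps : List String) (best : Nat), best ≤ tbl.length →
      ps.foldl (fun b p => bScan p tbl 0 b) best
        = ps.foldl (fun b p => min b (mIdx tbl p)) best := by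
  intro ps
  induction ps with
  | nil => intro best _; rfl
  | cons p ps ih =>
      intro best hb
      simp only [List.foldl_cons]
      rw [bScan_min tbl p best hb, ih _ (le_trans (Nat.min_le_left _ _) hb)]

lemma foldl_min_zero {α : Type} (f : α → Nat) : ∀ (ps : List α),
    ps.foldl (fun b p => min b (f p)) 0 = 0 := by
  intro ps
  induction ps with
  | nil => rfl
  | cons p ps ih => simpa using ih

lemma foldl_min_le_init {α : Type} (f : α → Nat) : ∀ (ps : List α) (b : Nat),
    ps.foldl (fun b p => min b (f p)) b ≤ b := by
  intro ps
  induction ps with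
  | nil => intro b; simp
  | cons p ps ih =>
      intro b
      exact le_trans (ih _) (Nat.min_le_left _ _)

lemma foldl_min_le_mem {α : Type} (f : α → Nat) : ∀ (ps : List α) (b : Nat) (p : α),
    p ∈ ps → ps.foldl (fun b p => min b (f p)) b ≤ f p := by
  intro ps
  induction ps with
  | nil => intro b p h; cases h
  | cons q ps ih =>
      intro b p h
      rcases List.mem_cons.mp h with h | h
      · subst h
        exact le_trans (foldl_min_le_init f ps _) (Nat.min_le_right _ _)
      · exact ih _ p h

lemma foldl_min_succ (pref : String) (rest : List String) :
    ∀ (ps : List String) (b : Nat),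
      ps.any (fun p => PySem.Str.startswith p pref) = false →
      ps.foldl (fun b p => min b (mIdx (pref :: rest) p)) (b + 1)
        = ps.foldl (fun b p => min b (mIdx rest p)) b + 1 := by
  intro ps
  induction ps with
  | nil => intro b _; rfl
  | cons p ps ih =>
      intro b h
      simp only [List.any_cons, Bool.or_eq_false_iff] at h
      have h1 : PySem.Chars.startswith p.toList pref.toList = false := by simpa using h.1
      have hmi : mIdx (pref :: rest) p = mIdx rest p + 1 := by
        simp [mIdx, List.findIdx_cons, h1]
      simp only [List.foldl_cons, hmi, Nat.succ_min_succ]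
      exact ih _ h.2

-- the loop interchange: min over processes of the first-match index = first index matched by any process
lemma swap_min (tbl : List String) : ∀ (ps : List String),
    ps.foldl (fun b p => min b (mIdx tbl p)) tbl.length
      = tbl.findIdx (fun pref => ps.any (fun p => PySem.Str.startswith p pref)) := by
  induction tbl with
  | nil =>
      intro ps
      have hz : ∀ p : String, mIdx ([] : List String) p = 0 := by intro p; simp [mIdx]
      simp only [hz, List.length_nil, List.findIdx_nil]
      exact foldl_min_zero _ ps
  | cons pref rest ih =>
      intro ps
      by_cases h : ps.any (fun p => PySem.Str.startswith p pref) = true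
      · rw [List.findIdx_cons]
        simp only [h, cond_true]
        rcases List.any_eq_true.mp h with ⟨p, hp, hm⟩
        have hm' : PySem.Chars.startswith p.toList pref.toList = true := by simpa using hm
        have h0 : mIdx (pref :: rest) p = 0 := by
          simp [mIdx, List.findIdx_cons, hm']
        have hle := foldl_min_le_mem (fun q => mIdx (pref :: rest) q) ps (pref :: rest).length p hp
        exact Nat.le_zero.mp (le_trans hle (le_of_eq h0))
      · have h' : ps.any (fun p => PySem.Str.startswith p pref) = false := by simpa using h
        rw [List.findIdx_cons]
        simp only [h', cond_false, List.length_cons]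
        rw [foldl_min_succ pref rest ps rest.length h', ih ps]

-- characterisation of A's nested loop over a zipped table of singleton-prefix entries
lemma aLoop_eq : ∀ (names tbl : List String) (ps : List String),
    names.length = tbl.length →
    aLoop ps (List.zipWith (fun n pr => (n, [pr])) names tbl)
      = (if tbl.findIdx (fun pref => ps.any (fun p => PySem.Str.startswith p pref)) < tbl.length
         then names.getD (tbl.findIdx (fun pref => ps.any (fun p => PySem.Str.startswith p pref))) "unknown"
         else "unknown") := by
  intro names
  induction names with
  | nil =>
      intro tbl ps h
      have : tbl = [] := List.eq_nil_of_length_eq_zero h.symm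
      subst this
      simp [aLoop]
  | cons n names ih =>
      intro tbl ps h
      cases tbl with
      | nil => simp at h
      | cons pref rest =>
          simp only [List.zipWith_cons_cons, aLoop]
          have hcond : (ps.any fun p => [pref].any fun pr => PySem.Str.startswith p pr)
              = ps.any (fun p => PySem.Str.startswith p pref) := by
            simp
          rw [hcond]
          by_cases hc : ps.any (fun p => PySem.Str.startswith p pref) = true
          · rw [if_pos hc, List.findIdx_cons, hc]
            simp
          · have hc' : ps.any (fun p => PySem.Str.startswith p pref) = false := by simpa using hc
            rw [if_neg hc, List.findIdx_cons, hc']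
            simp only [cond_false, List.length_cons]
            have h' : names.length = rest.length := by simpa using h
            rw [ih rest ps h']
            by_cases h2 : rest.findIdx (fun pref => ps.any (fun p => PySem.Str.startswith p pref)) < rest.length
            · rw [if_pos h2, if_pos (by omega)]
              simp
            · rw [if_neg h2, if_neg (by omega)]

lemma aTable_zip : aTable = List.zipWith (fun n pr => (n, [pr])) bNames bPrefixes := rfl

-- ===== VERDICT (by name: the statement is the Claim_ definition above) =====
theorem infer_desktop_session_spec : Claim_equal_infer_desktop_session := by
  intro env processes _
  unfold Spec_infer_desktop_session
  simp only [infer_desktop_session, infer_desktop_session_alt]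
  by_cases hd : envDesktop env ≠ ""
  · rw [if_pos hd, if_pos hd]
  · rw [if_neg hd, if_neg hd,
        foldl_bScan_min bPrefixes processes bPrefixes.length (le_refl _),
        swap_min bPrefixes processes, aTable_zip,
        aLoop_eq bNames bPrefixes processes rfl]
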